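-- pv_equiv track=rewrite | github.com/cliffthelin/pdf-consensus-becr | src/compareblocks/normalize/textnorm.py | _has_valid_word_pattern
-- ===== SOURCE A (Python) =====
-- def _has_valid_word_pattern(word: str) -> bool:
--     """Check if word has valid English word patterns."""
--     # Basic heuristics for English word patterns
--     if not word.isalpha():
--         return False
--
--     # Check for reasonable vowel/consonant distribution
--     vowels = set('aeiou')
--     vowel_count = sum(1 for c in word.lower() if c in vowels)
--     consonant_count = len(word) - vowel_count
--
--     # Words should have some vowels and consonants
--     if vowel_count == 0 or consonant_count == 0:
--         return False
--
--     # Check for excessive repeated characters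
--     for i in range(len(word) - 2):
--         if word[i] == word[i+1] == word[i+2]:
--             return False
--
--     return True
-- ===== SOURCE B (Python) =====
-- def _has_valid_word_pattern(word: str) -> bool:
--     """Single left-to-right scan: one state machine tracking vowel/consonant
--     presence and the current run of equal characters, with early exits."""
--     seen_vowel = seen_consonant = False
--     run_char, run_len = None, 0
--     for ch in word:
--         low = ch.lower()
--         if not ('a' <= low <= 'z'):
--             return False
--         if low in 'aeiou':
--             seen_vowel = True
--         else:
--             seen_consonant = True
--         if ch == run_char:
--             run_len += 1
--             if run_len == 3:
--                 return False
--         else: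
--             run_char, run_len = ch, 1
--     return seen_vowel and seen_consonant
-- ===== Notes on version B (the rewrite author's own statement) =====
-- stated objective: alternative
-- what changed: Replaces A's three staged passes (isalpha scan, vowel-counting pass, index loop over triples) by one single left-to-right state machine that tracks vowel/consonant presence and the current run length of equal characters, returning early on a non-letter or a third repeat.
import Mathlib
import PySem

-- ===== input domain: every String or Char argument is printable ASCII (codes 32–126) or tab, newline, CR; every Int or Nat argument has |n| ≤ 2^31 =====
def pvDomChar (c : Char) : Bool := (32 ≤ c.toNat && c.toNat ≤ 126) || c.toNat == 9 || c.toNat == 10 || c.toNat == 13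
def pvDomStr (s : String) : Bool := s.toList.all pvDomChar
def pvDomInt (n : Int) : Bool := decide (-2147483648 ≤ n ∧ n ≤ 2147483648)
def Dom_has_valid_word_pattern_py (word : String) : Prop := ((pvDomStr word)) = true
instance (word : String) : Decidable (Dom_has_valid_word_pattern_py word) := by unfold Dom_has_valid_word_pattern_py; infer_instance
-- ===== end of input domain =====

-- B replaces A's three staged passes by one single-pass state machine with early exits (objective: alternative).

-- ===== PORT A =====
def has_valid_word_pattern_py (word : String) : Bool :=
  if !(PySem.Chars.strIsalpha word.toList) then false
  else
    let vowels : PySem.Set Char := PySem.Set.ofList "aeiou".toList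
    let vowel_count : Int :=
      (PySem.Chars.lower word.toList).foldl
        (fun acc c => if PySem.Set.contains vowels c then acc + 1 else acc) 0
    let consonant_count : Int := PySem.Chars.len word.toList - vowel_count
    if vowel_count = 0 ∨ consonant_count = 0 then false
    else if (PySem.List.pyRange 0 (PySem.Chars.len word.toList - 2) 1).any
        (fun i => PySem.List.pyGetD word.toList i ' ' == PySem.List.pyGetD word.toList (i+1) ' '
               && PySem.List.pyGetD word.toList (i+1) ' ' == PySem.List.pyGetD word.toList (i+2) ' ')
      then false else true

-- ===== PORT B =====
-- the for-loop of Source B: state = (seen_vowel, seen_consonant, run_char, run_len)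
def pvAltLoop : List Char → Bool → Bool → Option Char → Nat → Bool
  | [], sv, sc, _, _ => sv && sc
  | ch :: rest, sv, sc, run_char, run_len =>
    let low := PySem.Chars.lowerChar ch
    if !(decide ('a' ≤ low) && decide (low ≤ 'z')) then false
    else
      let sv' := if "aeiou".toList.contains low then true else sv
      let sc' := if "aeiou".toList.contains low then sc else true
      if some ch == run_char then
        if run_len + 1 == 3 then false
        else pvAltLoop rest sv' sc' run_char (run_len + 1)
      else pvAltLoop rest sv' sc' (some ch) 1

def has_valid_word_pattern_py_alt (word : String) : Bool :=
  pvAltLoop word.toList false false none 0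

-- ===== PRECONDITION & SPEC =====
def Spec_has_valid_word_pattern_py (word : String) (out : Bool) : Prop := out = has_valid_word_pattern_py_alt word
instance (word : String) (out : Bool) : Decidable (Spec_has_valid_word_pattern_py word out) := by unfold Spec_has_valid_word_pattern_py; infer_instance

-- ===== CLAIM (what is proved, stated in full; the proofs are below) =====
def Claim_equal_has_valid_word_pattern_py : Prop := ∀ (word : String), Dom_has_valid_word_pattern_py word → Spec_has_valid_word_pattern_py word (has_valid_word_pattern_py word)

-- ===== LEMMAS AND PROOFS =====

-- per-character facts
def pvIsVow (c : Char) : Bool := "aeiou".toList.contains c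

theorem char_le_toNat (a b : Char) : (a ≤ b) ↔ a.toNat ≤ b.toNat := by
  rw [Char.le_def, UInt32.le_iff_toNat_le]
  exact Iff.rfl

theorem alpha_iff (c : Char) :
    PySem.Chars.isalpha c
      = (decide ('a' ≤ PySem.Chars.lowerChar c) && decide (PySem.Chars.lowerChar c ≤ 'z')) := by
  unfold PySem.Chars.isalpha PySem.Chars.islower PySem.Chars.lowerChar
  by_cases h : PySem.Chars.isupper c = true
  · rw [if_pos h, h, Bool.true_or]
    have hb : 'A' ≤ c ∧ c ≤ 'Z' := by
      have h' := h
      unfold PySem.Chars.isupper at h'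
      exact ⟨of_decide_eq_true (Bool.and_eq_true_iff.mp h').1,
             of_decide_eq_true (Bool.and_eq_true_iff.mp h').2⟩
    have hA : 'A'.toNat ≤ c.toNat := (char_le_toNat 'A' c).mp hb.1
    have hZ : c.toNat ≤ 'Z'.toNat := (char_le_toNat c 'Z').mp hb.2
    have eA : 'A'.toNat = 65 := rfl
    have eZ : 'Z'.toNat = 90 := rfl
    have hv : (Char.ofNat (c.toNat + 32)).toNat = c.toNat + 32 := by
      rw [Char.toNat_ofNat, if_pos]
      exact Or.inl (by omega)
    symm
    rw [Bool.and_eq_true_iff]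
    refine ⟨decide_eq_true ?_, decide_eq_true ?_⟩
    · rw [char_le_toNat, hv]; show 97 ≤ c.toNat + 32; omega
    · rw [char_le_toNat, hv]; show c.toNat + 32 ≤ 122; omega
  · rw [if_neg h, Bool.eq_false_iff.mpr h, Bool.false_or]

-- the "good" summary: all letters so far are alpha, and (modulo the seen flags) a vowel
-- and a consonant occur
def pvGood (l : List Char) (sv sc : Bool) : Bool :=
  l.all PySem.Chars.isalpha
    && (sv || (PySem.Chars.lower l).any pvIsVow)
    && (sc || (PySem.Chars.lower l).any (fun c => !pvIsVow c))

-- no three equal consecutive characters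
def pvNoTrip : List Char → Bool
  | a :: b :: c :: r => !(a == b && b == c) && pvNoTrip (b :: c :: r)
  | _ => true

theorem good_cons (a : Char) (l : List Char) (sv sc : Bool) :
    pvGood (a :: l) sv sc
      = ((decide ('a' ≤ PySem.Chars.lowerChar a) && decide (PySem.Chars.lowerChar a ≤ 'z'))
          && pvGood l (sv || pvIsVow (PySem.Chars.lowerChar a)) (sc || !pvIsVow (PySem.Chars.lowerChar a))) := by
  simp only [pvGood, List.all_cons, PySem.Chars.lower, List.map_cons, List.any_cons, ← alpha_iff]
  cases PySem.Chars.isalpha a <;> cases pvIsVow (PySem.Chars.lowerChar a) <;>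
    cases sv <;> cases sc <;> simp

theorem noTrip_skip (a c : Char) (l : List Char) (h : (c == a) = false) :
    pvNoTrip (c :: a :: l) = pvNoTrip (a :: l) := by
  cases l with
  | nil => simp [pvNoTrip]
  | cons x r => simp [pvNoTrip, h]

-- the state-machine invariant: the three reachable run states
theorem loop_spec (l : List Char) : ∀ sv sc : Bool,
    (pvAltLoop l sv sc none 0 = (pvGood l sv sc && pvNoTrip l))
    ∧ (∀ c, pvAltLoop l sv sc (some c) 1 = (pvGood l sv sc && pvNoTrip (c :: l)))
    ∧ (∀ c, pvAltLoop l sv sc (some c) 2 = (pvGood l sv sc && pvNoTrip (c :: c :: l))) := by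
  induction l with
  | nil =>
    intro sv sc
    refine ⟨?_, fun c => ?_, fun c => ?_⟩ <;>
      simp [pvAltLoop, pvGood, pvNoTrip, PySem.Chars.lower]
  | cons a t ih =>
    intro sv sc
    have step : ∀ (rc : Option Char) (rl : Nat),
        pvAltLoop (a :: t) sv sc rc rl
          = (let low := PySem.Chars.lowerChar a
             if !(decide ('a' ≤ low) && decide (low ≤ 'z')) then false
             else
               let sv' := if "aeiou".toList.contains low then true else sv
               let sc' := if "aeiou".toList.contains low then sc else true
               if some a == rc then
                 if rl + 1 == 3 then false
                 else pvAltLoop t sv' sc' rc (rl + 1)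
               else pvAltLoop t sv' sc' (some a) 1) := fun rc rl => rfl
    have flags : (if "aeiou".toList.contains (PySem.Chars.lowerChar a) then true else sv)
          = (sv || pvIsVow (PySem.Chars.lowerChar a))
        ∧ (if "aeiou".toList.contains (PySem.Chars.lowerChar a) then sc else true)
          = (sc || !pvIsVow (PySem.Chars.lowerChar a)) := by
      unfold pvIsVow
      cases h : "aeiou".toList.contains (PySem.Chars.lowerChar a) <;> simp [h]
    have enone : (some a == (none : Option Char)) = false := rfl
    have e1 : ((1 + 1 : Nat) == 3) = false := rfl
    have e2 : ((2 + 1 : Nat) == 3) = true := rfl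
    by_cases hA : (decide ('a' ≤ PySem.Chars.lowerChar a) && decide (PySem.Chars.lowerChar a ≤ 'z')) = true
    · have ih' := ih (sv || pvIsVow (PySem.Chars.lowerChar a)) (sc || !pvIsVow (PySem.Chars.lowerChar a))
      refine ⟨?_, fun c => ?_, fun c => ?_⟩
      · rw [step, good_cons]
        simp only [hA, Bool.not_true, Bool.false_eq_true, if_false, flags.1, flags.2, enone]
        rw [ih'.2.1 a]
        simp [hA]
      · rw [step, good_cons]
        simp only [hA, Bool.not_true, Bool.false_eq_true, if_false, flags.1, flags.2]
        by_cases hac : a = c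
        · subst hac
          have hbe : (some a == some a) = true := by simp
          rw [hbe]
          simp only [if_true, e1, Bool.false_eq_true, if_false]
          rw [ih'.2.2 a]
          simp [hA]
        · have hbe : (some a == some c) = false := by simp [hac]
          rw [hbe]
          simp only [Bool.false_eq_true, if_false]
          rw [ih'.2.1 a, noTrip_skip a c t (by simp [Ne.symm hac])]
          simp [hA]
      · rw [step, good_cons]
        simp only [hA, Bool.not_true, Bool.false_eq_true, if_false, flags.1, flags.2]
        by_cases hac : a = c
        · subst hac
          have hbe : (some a == some a) = true := by simp
          rw [hbe]
          simp only [if_true, e2]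
          simp [pvNoTrip]
        · have hbe : (some a == some c) = false := by simp [hac]
          rw [hbe]
          simp only [Bool.false_eq_true, if_false]
          rw [ih'.2.1 a]
          have h1 : pvNoTrip (c :: c :: a :: t) = pvNoTrip (c :: a :: t) := by
            simp [pvNoTrip, show (c == a) = false by simp [Ne.symm hac]]
          rw [h1, noTrip_skip a c t (by simp [Ne.symm hac])]
          simp [hA]
    · refine ⟨?_, fun c => ?_, fun c => ?_⟩ <;>
      · rw [step, good_cons]
        simp only [Bool.not_eq_true] at hA
        simp [hA]

-- A-side: the counting loop counts, and the index loop is pvNoTrip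
theorem count_foldl (p : Char → Bool) (l : List Char) (acc : Int) :
    l.foldl (fun acc c => if p c then acc + 1 else acc) acc = acc + (l.countP p : Int) := by
  induction l generalizing acc with
  | nil => simp
  | cons a t ih =>
    simp only [List.foldl_cons, List.countP_cons, ih]
    by_cases h : p a
    · simp [h]; ring
    · simp [h]

def natTriple (l : List Char) : Bool :=
  (List.range (l.length - 2)).any
    (fun k => (l.getD k ' ' == l.getD (k+1) ' ') && (l.getD (k+1) ' ' == l.getD (k+2) ' '))

theorem conv_triple (l : List Char) :
    (PySem.List.pyRange 0 ((l.length : Int) - 2) 1).any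
        (fun i => PySem.List.pyGetD l i ' ' == PySem.List.pyGetD l (i+1) ' '
               && PySem.List.pyGetD l (i+1) ' ' == PySem.List.pyGetD l (i+2) ' ')
      = natTriple l := by
  unfold natTriple
  rw [PySem.List.pyRange_one, List.any_map]
  apply List.any_congr
  · congr 1; omega
  · intro k
    simp only [Function.comp_def]
    rw [PySem.List.pyGetD_of_nonneg _ _ (by omega), PySem.List.pyGetD_of_nonneg _ _ (by omega),
        PySem.List.pyGetD_of_nonneg _ _ (by omega)]
    simp [List.getD, show ((k : Int) + 2).toNat = k + 2 from by omega]

theorem natTriple_eq_noTrip (l : List Char) : natTriple l = !pvNoTrip l := by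
  induction l with
  | nil => simp [natTriple, pvNoTrip]
  | cons a t ih =>
    match t with
    | [] => simp [natTriple, pvNoTrip]
    | [b] => simp [natTriple, pvNoTrip]
    | b :: c :: r =>
      unfold natTriple at ih ⊢
      simp only [List.length_cons]
      rw [show r.length + 1 + 1 + 1 - 2 = (r.length + 1 + 1 - 2) + 1 by omega,
          List.range_succ_eq_map]
      simp only [List.any_cons, List.any_map, Function.comp_def, Nat.succ_eq_add_one,
        List.getD_cons_succ, List.getD_cons_zero, List.length_cons] at ih ⊢
      rw [show r.length + 1 + 1 - 2 = r.length by omega] at ih ⊢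
      rw [ih]
      simp [pvNoTrip]

-- ===== VERDICT (by name: the statement is the Claim_ definition above) =====
theorem has_valid_word_pattern_py_spec : Claim_equal_has_valid_word_pattern_py := by
  intro word _
  unfold Spec_has_valid_word_pattern_py has_valid_word_pattern_py has_valid_word_pattern_py_alt
  rw [(loop_spec word.toList false false).1]
  generalize word.toList = l
  cases hA : PySem.Chars.strIsalpha l with
  | false =>
    rw [if_pos (by simp [hA])]
    cases hn : l.isEmpty with
    | false =>
      have hal : l.all PySem.Chars.isalpha = false := by
        unfold PySem.Chars.strIsalpha at hA
        rw [hn] at hA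
        simpa using hA
      simp [pvGood, hal]
    | true =>
      have hnil : l = [] := by simpa using hn
      subst hnil
      simp [pvGood, PySem.Chars.lower]
  | true =>
    have hall : l.all PySem.Chars.isalpha = true := by
      unfold PySem.Chars.strIsalpha at hA
      exact (Bool.and_eq_true_iff.mp hA).2
    simp only [hA, Bool.not_true, Bool.false_eq_true, if_false]
    rw [count_foldl]
    have hvw : ∀ c, (PySem.Set.ofList "aeiou".toList).contains c = pvIsVow c := by
      intro c
      rfl
    have hcount : (PySem.Chars.lower l).countP (PySem.Set.ofList "aeiou".toList).contains
        = (PySem.Chars.lower l).countP pvIsVow := by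
      apply List.countP_congr
      intro c _
      rw [hvw c]
    have hlen : PySem.Chars.len l = ((PySem.Chars.lower l).length : Int) := by
      simp [PySem.Chars.len, PySem.Chars.lower]
    have hle := List.countP_le_length (p := pvIsVow) (l := PySem.Chars.lower l)
    by_cases hz : ((PySem.Chars.lower l).countP pvIsVow = 0
        ∨ (PySem.Chars.lower l).countP pvIsVow = (PySem.Chars.lower l).length)
    · rw [if_pos (by rw [hcount, hlen]; omega)]
      rcases hz with hz | hz
      · have hv0 : (PySem.Chars.lower l).any pvIsVow = false := by
          rw [List.any_eq_false]
          intro c hc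
          exact List.countP_eq_zero.mp hz c hc
        simp [pvGood, hv0]
      · have hc0 : (PySem.Chars.lower l).any (fun c => !pvIsVow c) = false := by
          rw [List.any_eq_false]
          intro c hc
          have := List.countP_eq_length.mp hz c hc
          simp [this]
        simp [pvGood, hc0]
    · rw [if_neg (by rw [hcount, hlen]; omega)]
      have h1 : (PySem.Chars.lower l).any pvIsVow = true := by
        cases he : (PySem.Chars.lower l).any pvIsVow with
        | true => rfl
        | false =>
          exfalso
          apply hz
          left
          rw [List.countP_eq_zero]
          intro c hc
          exact List.any_eq_false.mp he c hc
      have h2 : (PySem.Chars.lower l).any (fun c => !pvIsVow c) = true := by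
        cases he : (PySem.Chars.lower l).any (fun c => !pvIsVow c) with
        | true => rfl
        | false =>
          exfalso
          apply hz
          right
          rw [List.countP_eq_length]
          intro c hc
          have := List.any_eq_false.mp he c hc
          simpa using this
      have hconv : PySem.Chars.len l = ((l.length : Int)) := by simp [PySem.Chars.len]
      rw [hconv, conv_triple l, natTriple_eq_noTrip]
      simp only [pvGood, hall, h1, h2, Bool.and_self, Bool.true_and, Bool.or_false]
      cases pvNoTrip l <;> simp
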